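-- pv_equiv track=rewrite | github.com/MrBrantCode/unitest_baseline | mut_generate/mist_train_cf/cf_65787/solution.py | min_set
-- ===== SOURCE A (Python) =====
-- def min_set(arr, K):
--     arr.sort(reverse=True)  # sort the array in descending order
--     result = []
--
--     for i in arr:
--         while (K >= i):  # while the element can be subtracted from K
--             K -= i  # subtract it from K
--             result.append(i)  # and add it to the result
--
--     return result  # return the result set
-- ===== SOURCE B (Python) =====
-- def min_set(arr, K):
--     # Return value only: A also sorts arr in place; B leaves arr untouched.
--     result = []
--     for i in sorted({x for x in arr if x > 0}, reverse=True):
--         c = K // i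
--         if c > 0:
--             result.extend([i] * c)
--             K -= i * c
--     return result
-- ===== Notes on version B (the rewrite author's own statement) =====
-- stated objective: simpler
-- what changed: B iterates once over the distinct positive values (a set, sorted descending) and takes each value's whole contribution in one floor division, instead of A's repeated-subtraction inner while loop over every (duplicated) element; equivalence is about the return value only (A sorts arr in place, B does not mutate it).
import Mathlib
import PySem

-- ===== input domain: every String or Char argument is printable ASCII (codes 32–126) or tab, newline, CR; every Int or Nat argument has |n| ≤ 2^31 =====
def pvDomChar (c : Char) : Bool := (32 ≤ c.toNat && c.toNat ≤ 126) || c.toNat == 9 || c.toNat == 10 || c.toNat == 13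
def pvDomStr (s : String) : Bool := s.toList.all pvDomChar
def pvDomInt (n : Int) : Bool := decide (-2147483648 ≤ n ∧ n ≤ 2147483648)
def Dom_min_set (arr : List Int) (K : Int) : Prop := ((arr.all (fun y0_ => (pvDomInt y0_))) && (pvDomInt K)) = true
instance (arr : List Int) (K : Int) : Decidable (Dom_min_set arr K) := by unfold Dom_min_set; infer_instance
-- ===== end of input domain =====

-- B replaces A's per-element repeated-subtraction while loop by one floor division per
-- DISTINCT positive value (iterating sorted(set(...), reverse=True)); return value only:
-- Python A sorts arr in place, B does not mutate it.

-- ===== PORT A =====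
-- while (K >= i): K -= i; result.append(i).  The '0 < i' conjunct only makes the
-- recursion total; where it fails with i ≤ K, Python A loops forever (outside Pre_).
def minSetLoopA (i : Int) (K : Int) (res : List Int) : Int × List Int :=
  if _h : i ≤ K ∧ 0 < i then minSetLoopA i (K - i) (res ++ [i]) else (K, res)
termination_by K.toNat
decreasing_by omega

def min_set (arr : List Int) (K : Int) : List Int :=
  ((PySem.List.sorted arr (fun x => x) true).foldl
      (fun (st : Int × List Int) i => minSetLoopA i st.1 st.2) (K, [])).2

-- ===== PORT B =====
-- body of B's for loop: c = K // i; if c > 0: result += [i]*c; K -= i*c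
def minSetStepB (st : Int × List Int) (i : Int) : Int × List Int :=
  let c := PySem.Int.floordiv st.1 i
  if 0 < c then (st.1 - i * c, st.2 ++ List.replicate c.toNat i) else st

def min_set_alt (arr : List Int) (K : Int) : List Int :=
  ((PySem.List.sorted (PySem.Set.ofList (arr.filter (fun x => decide (0 < x))))
      (fun x => x) true).foldl minSetStepB (K, [])).2

-- ===== PRECONDITION & SPEC =====
-- Pre_ excludes exactly the inputs where Python A loops forever: whenever some element
-- i ≤ 0 is reached with current K ≥ i the while loop never ends; since K can only have
-- decreased, A terminates iff every non-positive element exceeds the initial K.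
def Pre_min_set (arr : List Int) (K : Int) : Prop := ∀ x ∈ arr, 0 < x ∨ K < x
instance (arr : List Int) (K : Int) : Decidable (Pre_min_set arr K) := by
  unfold Pre_min_set; infer_instance

def pvWitness_min_set : List Int × Int := ([3, 1, 2], 7)

def Spec_min_set (arr : List Int) (K : Int) (out : List Int) : Prop := out = min_set_alt arr K
instance (arr : List Int) (K : Int) (out : List Int) : Decidable (Spec_min_set arr K out) := by
  unfold Spec_min_set; infer_instance

-- ===== CLAIM (what is proved, stated in full; the proofs are below) =====
def Claim_equal_min_set : Prop := ∀ (arr : List Int) (K : Int), Dom_min_set arr K → Pre_min_set arr K → Spec_min_set arr K (min_set arr K)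

-- ===== LEMMAS AND PROOFS =====

-- B's step never increases the money left
lemma stepB_fst_le (K : Int) (res : List Int) (i : Int) (hi : 0 < i) :
    (minSetStepB (K, res) i).1 ≤ K := by
  by_cases hc : 0 < PySem.Int.floordiv K i
  · have := mul_pos hi hc
    simp [minSetStepB, hc]; nlinarith
  · simp [minSetStepB, hc]

-- after B's step for a positive i, the remainder is below i
lemma stepB_fst_lt (K : Int) (res : List Int) (i : Int) (hi : 0 < i) :
    (minSetStepB (K, res) i).1 < i := by
  have hbr := (PySem.Int.floordiv_eq_iff_of_pos (a := K) (b := i)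
      (q := PySem.Int.floordiv K i) hi).mp rfl
  by_cases hc : 0 < PySem.Int.floordiv K i
  · simp [minSetStepB, hc]; nlinarith [hbr.2]
  · have h1 : ¬ (1 : Int) ≤ PySem.Int.floordiv K i := by omega
    rw [PySem.Int.le_floordiv_iff_mul_le hi] at h1
    simp [minSetStepB, hc]; omega

-- B's step is a no-op when K is already below a positive i
lemma stepB_noop (K : Int) (res : List Int) (i : Int) (hi : 0 < i) (hK : K < i) :
    minSetStepB (K, res) i = (K, res) := by
  have h1 : ¬ (1 : Int) ≤ PySem.Int.floordiv K i := by
    rw [PySem.Int.le_floordiv_iff_mul_le hi]; omega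
  simp [minSetStepB]; omega

-- A's inner while loop is a no-op when K < i
lemma loopA_noop (i K : Int) (res : List Int) (hK : K < i) :
    minSetLoopA i K res = (K, res) := by
  rw [minSetLoopA]; simp; omega

-- for positive i, A's repeated subtraction computes exactly B's division step
lemma loopA_eq_stepB (i : Int) (hi : 0 < i) : ∀ n K res, K.toNat ≤ n →
    minSetLoopA i K res = minSetStepB (K, res) i := by
  intro n
  induction n with
  | zero =>
    intro K res hK
    have hKi : K < i := by omega
    rw [loopA_noop i K res hKi, stepB_noop K res i hi hKi]
  | succ m ih =>
    intro K res hK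
    by_cases hge : i ≤ K
    · have hbr := (PySem.Int.floordiv_eq_iff_of_pos (a := K) (b := i)
          (q := PySem.Int.floordiv K i) hi).mp rfl
      have hq1 : 1 ≤ PySem.Int.floordiv K i := by
        rw [PySem.Int.le_floordiv_iff_mul_le hi]; omega
      rw [minSetLoopA]
      simp only [hge, hi, and_self, dite_true]
      rw [ih (K - i) (res ++ [i]) (by omega)]
      have hqsub : PySem.Int.floordiv (K - i) i = PySem.Int.floordiv K i - 1 := by
        rw [PySem.Int.floordiv_eq_iff_of_pos hi]; constructor <;> nlinarith [hbr.1, hbr.2]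
      by_cases hq2 : 2 ≤ PySem.Int.floordiv K i
      · have hpos : (0:Int) < PySem.Int.floordiv K i - 1 := by omega
        have hpos' : (0:Int) < PySem.Int.floordiv K i := by omega
        simp only [minSetStepB, hqsub, hpos, hpos', if_pos, Prod.mk.injEq]
        constructor
        · ring
        · have hT : (PySem.Int.floordiv K i).toNat = (PySem.Int.floordiv K i - 1).toNat + 1 := by
            omega
          rw [hT, List.replicate_succ, List.append_assoc]
          rfl
      · have hq1' : PySem.Int.floordiv K i = 1 := by omega
        simp [minSetStepB, hqsub, hq1', List.replicate_succ]
    · have hKi : K < i := by omega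
      rw [loopA_noop i K res hKi, stepB_noop K res i hi hKi]

lemma loopA_eq_stepB' (i K : Int) (res : List Int) (hi : 0 < i) :
    minSetLoopA i K res = minSetStepB (K, res) i :=
  loopA_eq_stepB i hi K.toNat K res le_rfl

-- folding A's loop over a list = folding B's step over its positive elements,
-- provided every non-positive element exceeds the current K
lemma fold_filter (l : List Int) : ∀ K res, (∀ x ∈ l, 0 < x ∨ K < x) →
    l.foldl (fun (st : Int × List Int) i => minSetLoopA i st.1 st.2) (K, res)
      = (l.filter (fun x => decide (0 < x))).foldl minSetStepB (K, res) := by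
  induction l with
  | nil => intro K res _; rfl
  | cons i t ih =>
    intro K res hpre
    by_cases hi : 0 < i
    · simp only [List.foldl_cons, List.filter_cons, hi, decide_true, if_true]
      show List.foldl _ (minSetLoopA i K res) t = _
      rw [loopA_eq_stepB' i K res hi]
      have hst : minSetStepB (K, res) i
          = ((minSetStepB (K, res) i).1, (minSetStepB (K, res) i).2) := rfl
      rw [hst]
      have hle := stepB_fst_le K res i hi
      exact ih _ _ (fun x hx => by
        rcases hpre x (List.mem_cons_of_mem _ hx) with h' | h'
        · exact Or.inl h'
        · exact Or.inr (lt_of_le_of_lt hle h'))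
    · have hKi : K < i := by
        rcases hpre i List.mem_cons_self with h' | h'
        · exact absurd h' hi
        · exact h'
      simp only [List.foldl_cons, List.filter_cons, hi, decide_false, Bool.false_eq_true,
        if_false]
      show List.foldl _ (minSetLoopA i K res) t = _
      rw [loopA_noop i K res hKi]
      exact ih K res (fun x hx => hpre x (List.mem_cons_of_mem _ hx))

-- duplicates of the maximal value i are no-ops once K < i
lemma fold_skip (i : Int) (t : List Int) : ∀ K res, (∀ x ∈ t, 0 < x ∧ x ≤ i) → K < i →
    t.foldl minSetStepB (K, res) = (t.filter (fun x => decide (x ≠ i))).foldl minSetStepB (K, res) := by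
  induction t with
  | nil => intro K res _ _; rfl
  | cons x t ih =>
    intro K res hb hK
    obtain ⟨hx0, hxi⟩ := hb x List.mem_cons_self
    by_cases hxe : x = i
    · subst hxe
      simp only [List.foldl_cons, List.filter_cons, ne_eq, not_true_eq_false, decide_false]
      rw [stepB_noop K res x hx0 hK]
      exact ih K res (fun y hy => hb y (List.mem_cons_of_mem _ hy)) hK
    · simp only [List.foldl_cons, List.filter_cons, ne_eq, hxe, not_false_eq_true, decide_true,
        if_true]
      have hle := stepB_fst_le K res x hx0
      have : minSetStepB (K, res) x = ((minSetStepB (K, res) x).1, (minSetStepB (K, res) x).2) := rfl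
      rw [this]
      exact ih _ _ (fun y hy => hb y (List.mem_cons_of_mem _ hy)) (lt_of_le_of_lt hle hK)

-- folding B's step over a descending positive list = folding it over the strictly
-- descending list of its distinct values
lemma fold_strict : ∀ n (l m : List Int), l.length ≤ n →
    l.Pairwise (fun a b => b ≤ a) → m.Pairwise (fun a b => b < a) →
    (∀ x, x ∈ m ↔ x ∈ l) → (∀ x ∈ l, 0 < x) → ∀ K res,
    l.foldl minSetStepB (K, res) = m.foldl minSetStepB (K, res) := by
  intro n
  induction n with
  | zero =>
    intro l m hlen _ _ hmem _ K res
    have hl : l = [] := by cases l <;> simp_all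
    subst hl
    have hm : m = [] := by
      cases m with
      | nil => rfl
      | cons a t => exact absurd ((hmem a).mp List.mem_cons_self) (List.not_mem_nil)
    subst hm; rfl
  | succ nn ih =>
    intro l m hlen hl hm hmem hpos K res
    cases l with
    | nil =>
      have hm' : m = [] := by
        cases m with
        | nil => rfl
        | cons a t => exact absurd ((hmem a).mp List.mem_cons_self) (List.not_mem_nil)
      subst hm'; rfl
    | cons i t =>
      cases m with
      | nil => exact absurd ((hmem i).mpr List.mem_cons_self) (by simp)
      | cons j m' =>
        have hji : i = j := by
          have h1 : j ∈ i :: t := (hmem j).mp List.mem_cons_self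
          have h2 : i ∈ j :: m' := (hmem i).mpr List.mem_cons_self
          rcases List.mem_cons.mp h1 with h | h
          · omega
          · have hji' : j ≤ i := (List.pairwise_cons.mp hl).1 j h
            rcases List.mem_cons.mp h2 with h' | h'
            · omega
            · have : i < j := (List.pairwise_cons.mp hm).1 i h'
              omega
        subst hji
        simp only [List.foldl_cons]
        have hi0 : 0 < i := hpos i List.mem_cons_self
        have hlt := stepB_fst_lt K res i hi0
        have hsplit : minSetStepB (K, res) i = ((minSetStepB (K, res) i).1, (minSetStepB (K, res) i).2) := rfl
        rw [hsplit]
        rw [fold_skip i t _ _ (fun x hx => ⟨hpos x (List.mem_cons_of_mem _ hx),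
            (List.pairwise_cons.mp hl).1 x hx⟩) hlt]
        apply ih
        · have hfl := List.length_filter_le (fun x => decide (x ≠ i)) t
          simp only [List.length_cons] at hlen
          omega
        · exact ((List.pairwise_cons.mp hl).2).filter _
        · exact (List.pairwise_cons.mp hm).2
        · intro x
          constructor
          · intro hx
            have hxm : x ∈ i :: m' := List.mem_cons_of_mem _ hx
            have hxl : x ∈ i :: t := (hmem x).mp hxm
            have hxi : x ≠ i := by
              have : x < i := (List.pairwise_cons.mp hm).1 x hx
              omega
            rcases List.mem_cons.mp hxl with h | h
            · exact absurd h hxi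
            · exact List.mem_filter.mpr ⟨h, by simpa using hxi⟩
          · intro hx
            obtain ⟨hxt, hxi⟩ := List.mem_filter.mp hx
            have hxm : x ∈ i :: m' := (hmem x).mpr (List.mem_cons_of_mem _ hxt)
            rcases List.mem_cons.mp hxm with h | h
            · simp at hxi; exact absurd h hxi
            · exact h
        · intro x hx
          exact hpos x (List.mem_cons_of_mem _ (List.mem_filter.mp hx).1)

-- ===== VERDICT (by name: the statement is the Claim_ definition above) =====
theorem min_set_spec : Claim_equal_min_set := by
  intro arr K _ hpre
  unfold Spec_min_set min_set min_set_alt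
  set s := PySem.List.sorted arr (fun x => x) true with hs
  set vals := PySem.List.sorted (PySem.Set.ofList (arr.filter (fun x => decide (0 < x))))
      (fun x => x) true with hv
  have hpres : ∀ x ∈ s, 0 < x ∨ K < x := fun x hx =>
    hpre x ((PySem.List.mem_sorted _ _ _ _).mp hx)
  rw [fold_filter s K [] hpres]
  have hsdesc : s.Pairwise (fun a b => b ≤ a) := PySem.List.sorted_pairwise_rev arr _
  have hfdesc : (s.filter (fun x => decide (0 < x))).Pairwise (fun a b => b ≤ a) :=
    hsdesc.filter _
  have hvnodup : vals.Nodup :=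
    ((PySem.List.sorted_perm _ _ _).nodup_iff).mpr (PySem.Set.nodup_ofList _)
  have hvdesc : vals.Pairwise (fun a b => b < a) := by
    have h1 : vals.Pairwise (fun a b => b ≤ a) := PySem.List.sorted_pairwise_rev _ _
    have h2 : vals.Pairwise (fun a b => a ≠ b) := hvnodup
    exact (h1.and h2).imp (fun h => lt_of_le_of_ne h.1 (Ne.symm h.2))
  have hmem : ∀ x, x ∈ vals ↔ x ∈ s.filter (fun x => decide (0 < x)) := by
    intro x
    rw [PySem.List.mem_sorted, PySem.Set.mem_ofList, List.mem_filter, List.mem_filter,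
      PySem.List.mem_sorted]
  have hpos : ∀ x ∈ s.filter (fun x => decide (0 < x)), 0 < x := fun x hx => by
    simpa using (List.mem_filter.mp hx).2
  have hkey : List.foldl minSetStepB (K, []) (s.filter (fun x => decide (0 < x)))
      = List.foldl minSetStepB (K, []) vals :=
    fold_strict (s.filter (fun x => decide (0 < x))).length
      (s.filter (fun x => decide (0 < x))) vals le_rfl hfdesc hvdesc hmem hpos K []
  rw [hkey]
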